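-- pv_equiv track=rewrite | github.com/AIForHindustan/aion_algo_trading | src/intraday_trading/trading_system/storage/data_migrator.py | _pattern_matches
-- ===== SOURCE A (Python) =====
-- def _pattern_matches(key: str, pattern: str) -> bool:
--     """
--     Check if a key matches a pattern with placeholders.
--
--     Args:
--         key: Actual Redis key
--         pattern: Pattern with placeholders like {token}, {symbol}, etc.
--
--     Returns:
--         True if key matches pattern structure
--     """
--     # Simple pattern matching - split by colons and compare structure
--     key_parts = key.split(':')
--     pattern_parts = pattern.split(':')
--
--     if len(key_parts) != len(pattern_parts):
--         return False
--
--     for k_part, p_part in zip(key_parts, pattern_parts):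
--         # If pattern part is a placeholder (starts with {), it matches anything
--         if p_part.startswith('{') and p_part.endswith('}'):
--             continue
--         # Otherwise, exact match required
--         if k_part != p_part:
--             return False
--
--     return True
-- ===== SOURCE B (Python) =====
-- def _pattern_matches(key: str, pattern: str) -> bool:
--     """Streaming re-implementation: peel one colon-delimited segment at a time
--     with str.partition and recurse, instead of splitting both strings into
--     lists, comparing lengths and zipping."""
--     k_seg, k_sep, k_rest = key.partition(':')
--     p_seg, p_sep, p_rest = pattern.partition(':')
--     if not (p_seg.startswith('{') and p_seg.endswith('}')) and k_seg != p_seg: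
--         return False
--     if k_sep and p_sep:
--         return _pattern_matches(k_rest, p_rest)
--     return not k_sep and not p_sep
-- ===== Notes on version B (the rewrite author's own statement) =====
-- stated objective: alternative
-- what changed: Replaces split-both-strings-into-lists + length comparison + zip loop by a streaming recursion that peels one colon-delimited segment from each string with str.partition, compares it (placeholder or exact) and recurses on the remainders, failing as soon as one string runs out of segments before the other.
import Mathlib
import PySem

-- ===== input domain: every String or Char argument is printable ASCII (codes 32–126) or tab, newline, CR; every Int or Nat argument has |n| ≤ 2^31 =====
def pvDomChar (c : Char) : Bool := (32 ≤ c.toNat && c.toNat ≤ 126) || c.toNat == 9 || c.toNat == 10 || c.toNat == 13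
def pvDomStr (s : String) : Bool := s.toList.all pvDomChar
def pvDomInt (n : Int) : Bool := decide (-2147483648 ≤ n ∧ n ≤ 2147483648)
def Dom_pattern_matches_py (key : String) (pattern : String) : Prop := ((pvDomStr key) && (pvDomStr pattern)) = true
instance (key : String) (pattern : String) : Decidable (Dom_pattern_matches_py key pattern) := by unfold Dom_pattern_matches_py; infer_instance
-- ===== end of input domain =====

-- B peels one colon-delimited segment at a time (str.partition + recursion) instead of A's
-- split-into-lists + length check + zip loop; same values everywhere (objective: alternative).

-- ===== PORT A =====
-- the for-loop over zip(key_parts, pattern_parts)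
def pmLoopA : List (List Char × List Char) → Bool
  | [] => true
  | (kPart, pPart) :: rest =>
    if PySem.Chars.startswith pPart ['{'] && PySem.Chars.endswith pPart ['}'] then
      pmLoopA rest
    else if kPart ≠ pPart then false
    else pmLoopA rest

def pattern_matches_py (key : String) (pattern : String) : Bool :=
  let keyParts := PySem.Chars.splitOn key.toList [':']          -- key.split(':')
  let patternParts := PySem.Chars.splitOn pattern.toList [':']  -- pattern.split(':')
  if keyParts.length ≠ patternParts.length then false
  else pmLoopA (keyParts.zip patternParts)

-- ===== PORT B =====
-- str.partition(':') ported by hand (exact for a single-char separator): the segment before the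
-- first ':', whether a ':' was found (Python's middle component '' vs ':'), and the remainder.
def pmGoB (k p : List Char) : Bool :=
  let kSeg := k.takeWhile (· ≠ ':')
  let pSeg := p.takeWhile (· ≠ ':')
  if !(PySem.Chars.startswith pSeg ['{'] && PySem.Chars.endswith pSeg ['}']) && kSeg ≠ pSeg then
    false
  else
    match hk : k.dropWhile (· ≠ ':'), p.dropWhile (· ≠ ':') with
    | _ :: kRest, _ :: pRest => pmGoB kRest pRest   -- both seps found: recurse on remainders
    | [], [] => true                                 -- neither has a further segment
    | _, _ => false                                  -- one exhausted before the other
termination_by k.length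
decreasing_by
  have h := List.length_dropWhile_le (p := fun c => decide (c ≠ ':')) (l := k)
  rw [hk] at h
  simp at h
  omega

def pattern_matches_py_alt (key : String) (pattern : String) : Bool :=
  pmGoB key.toList pattern.toList

-- ===== PRECONDITION & SPEC =====
def Spec_pattern_matches_py (key : String) (pattern : String) (out : Bool) : Prop := out = pattern_matches_py_alt key pattern
instance (key : String) (pattern : String) (out : Bool) : Decidable (Spec_pattern_matches_py key pattern out) := by unfold Spec_pattern_matches_py; infer_instance

-- ===== CLAIM (what is proved, stated in full; the proofs are below) =====
def Claim_equal_pattern_matches_py : Prop := ∀ (key : String) (pattern : String), Dom_pattern_matches_py key pattern → Spec_pattern_matches_py key pattern (pattern_matches_py key pattern)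

-- ===== LEMMAS AND PROOFS =====

-- proof-side model of s.split(':')
def splitC : List Char → List (List Char)
  | [] => [[]]
  | c :: rest =>
    if c = ':' then [] :: splitC rest
    else
      match splitC rest with
      | ch :: chs => (c :: ch) :: chs
      | [] => [[c]]

theorem splitC_ne_nil (cs : List Char) : splitC cs ≠ [] := by
  induction cs with
  | nil => simp [splitC]
  | cons c rest ih =>
    simp only [splitC]
    split
    · simp
    · cases h : splitC rest <;> simp

theorem splitC_eq (cs : List Char) :
    splitC cs = cs.takeWhile (· ≠ ':') ::
      (match cs.dropWhile (· ≠ ':') with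
        | [] => []
        | _ :: rest => splitC rest) := by
  induction cs with
  | nil => simp [splitC]
  | cons c rest ih =>
    by_cases hc : c = ':'
    · subst hc; simp [splitC, List.takeWhile, List.dropWhile]
    · simp only [splitC, ih]
      simp [hc]

theorem go_spec : ∀ (l : List Char) (fuel : Nat) (cur : List Char) (acc : List (List Char)),
    l.length < fuel →
    PySem.Chars.splitOn.go [':'] fuel l cur acc =
      acc.reverse ++ ((splitC l).modifyHead (cur.reverse ++ ·)) := by
  intro l
  induction l with
  | nil =>
    intro fuel cur acc h
    match fuel with
    | f + 1 => simp [PySem.Chars.splitOn.go, splitC]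
  | cons c rest ih =>
    intro fuel cur acc h
    match fuel with
    | f + 1 =>
      simp only [List.length_cons, Nat.add_lt_add_iff_right] at h
      by_cases hc : c = ':'
      · subst hc
        have step : PySem.Chars.splitOn.go [':'] (f + 1) (':' :: rest) cur acc
            = PySem.Chars.splitOn.go [':'] f rest [] (cur.reverse :: acc) := by
          rw [PySem.Chars.splitOn.go]
          simp [List.isPrefixOf]
        rw [step, ih f [] (cur.reverse :: acc) h]
        cases hsp : splitC rest with
        | nil => exact absurd hsp (splitC_ne_nil rest)
        | cons ch chs => simp [splitC, hsp]
      · have step : PySem.Chars.splitOn.go [':'] (f + 1) (c :: rest) cur acc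
            = PySem.Chars.splitOn.go [':'] f rest (c :: cur) acc := by
          rw [PySem.Chars.splitOn.go]
          rw [if_neg (by simp [List.isPrefixOf, Ne.symm hc])]
        rw [step, ih f (c :: cur) acc h]
        cases hsp : splitC rest with
        | nil => exact absurd hsp (splitC_ne_nil rest)
        | cons ch chs => simp [splitC, hc, hsp]

theorem splitOn_eq_splitC (cs : List Char) :
    PySem.Chars.splitOn cs [':'] = splitC cs := by
  rw [PySem.Chars.splitOn]
  rw [go_spec cs (cs.length + 1) [] [] (by omega)]
  simp
  cases h : splitC cs with
  | nil => exact absurd h (splitC_ne_nil cs)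
  | cons a l => simp

-- non-dependent unfolding of pmGoB (the definition's match carries an equation for termination)
theorem pmGoB_unfold (k p : List Char) :
    pmGoB k p =
      (if !(PySem.Chars.startswith (p.takeWhile (· ≠ ':')) ['{'] &&
            PySem.Chars.endswith (p.takeWhile (· ≠ ':')) ['}']) &&
            decide (k.takeWhile (· ≠ ':') ≠ p.takeWhile (· ≠ ':')) then false
       else
        match k.dropWhile (· ≠ ':'), p.dropWhile (· ≠ ':') with
        | _ :: kRest, _ :: pRest => pmGoB kRest pRest
        | [], [] => true
        | _, _ => false) := by
  rw [pmGoB]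
  congr 1
  split
  · rename_i h1 h2
    rw [h1, h2]
  · rename_i h1 h2
    rw [h1, h2]
  · rename_i h1 h2 h3
    cases hk : List.dropWhile (fun x => decide (x ≠ ':')) k <;>
      cases hp : List.dropWhile (fun x => decide (x ≠ ':')) p <;> simp only [hk, hp]
    · exact (h3 hk hp).elim
    · exact (h2 _ _ _ _ hk hp).elim

theorem cond_or {a : Bool} {x y : List Char}
    (h : ¬((!a && decide (x ≠ y)) = true)) : a = true ∨ x = y := by
  by_cases ha : a = true
  · exact Or.inl ha
  · right
    by_contra hxy
    exact h (by simp [ha, hxy])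

theorem pmLoopA_skip (ks ps : List Char) (t : List (List Char × List Char))
    (h : (PySem.Chars.startswith ps ['{'] && PySem.Chars.endswith ps ['}']) = true ∨ ks = ps) :
    pmLoopA ((ks, ps) :: t) = pmLoopA t := by
  by_cases hpl : (PySem.Chars.startswith ps ['{'] && PySem.Chars.endswith ps ['}']) = true
  · rw [pmLoopA, if_pos hpl]
  · have hks : ks = ps := h.resolve_left hpl
    rw [pmLoopA, if_neg hpl, if_neg (by simp [hks])]

theorem pmGoB_eq_aux : ∀ (n : Nat) (k p : List Char), k.length ≤ n →
    pmGoB k p =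
      (if (splitC k).length ≠ (splitC p).length then false
       else pmLoopA ((splitC k).zip (splitC p))) := by
  intro n
  induction n with
  | zero =>
    intro k p hle
    have hk0 : k = [] := List.eq_nil_of_length_eq_zero (Nat.le_zero.mp hle)
    subst hk0
    rw [pmGoB_unfold]
    by_cases hcond : (!(PySem.Chars.startswith (p.takeWhile (· ≠ ':')) ['{'] &&
        PySem.Chars.endswith (p.takeWhile (· ≠ ':')) ['}']) &&
        decide (([] : List Char).takeWhile (· ≠ ':') ≠ p.takeWhile (· ≠ ':'))) = true
    · rw [if_pos hcond]
      simp only [Bool.and_eq_true, Bool.not_eq_true', decide_eq_true_eq] at hcond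
      obtain ⟨hpl, hne⟩ := hcond
      by_cases hlen : (splitC ([] : List Char)).length ≠ (splitC p).length
      · rw [if_pos hlen]
      · rw [if_neg hlen, splitC_eq ([] : List Char), splitC_eq p, List.zip_cons_cons, pmLoopA]
        rw [if_neg (by simp only [hpl]; simp), if_pos (by exact hne)]
    · rw [if_neg hcond]
      cases hp : List.dropWhile (fun x => decide (x ≠ ':')) p with
      | nil =>
        rw [splitC_eq ([] : List Char), splitC_eq p]
        simp only [List.dropWhile_nil, hp]
        rw [if_neg (by simp), List.zip_cons_cons, List.zip_nil_right]
        rw [pmLoopA_skip _ _ _ (cond_or hcond), pmLoopA]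
      | cons pc pRest =>
        rw [splitC_eq ([] : List Char), splitC_eq p]
        simp only [List.dropWhile_nil, hp]
        rw [if_pos ?_]
        cases hq : splitC pRest with
        | nil => exact absurd hq (splitC_ne_nil pRest)
        | cons a l => simp [hq]
  | succ n ih =>
    intro k p hle
    rw [pmGoB_unfold]
    by_cases hcond : (!(PySem.Chars.startswith (p.takeWhile (· ≠ ':')) ['{'] &&
        PySem.Chars.endswith (p.takeWhile (· ≠ ':')) ['}']) &&
        decide (k.takeWhile (· ≠ ':') ≠ p.takeWhile (· ≠ ':'))) = true
    · rw [if_pos hcond]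
      simp only [Bool.and_eq_true, Bool.not_eq_true', decide_eq_true_eq] at hcond
      obtain ⟨hpl, hne⟩ := hcond
      by_cases hlen : (splitC k).length ≠ (splitC p).length
      · rw [if_pos hlen]
      · rw [if_neg hlen, splitC_eq k, splitC_eq p, List.zip_cons_cons, pmLoopA]
        rw [if_neg (by simp only [hpl]; simp), if_pos (by exact hne)]
    · rw [if_neg hcond]
      cases hk : List.dropWhile (fun x => decide (x ≠ ':')) k with
      | nil =>
        cases hp : List.dropWhile (fun x => decide (x ≠ ':')) p with
        | nil =>
          rw [splitC_eq k, splitC_eq p, hk, hp]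
          rw [if_neg (by simp), List.zip_cons_cons, List.zip_nil_right]
          rw [pmLoopA_skip _ _ _ (cond_or hcond), pmLoopA]
        | cons pc pRest =>
          rw [splitC_eq k, splitC_eq p, hk, hp]
          rw [if_pos ?_]
          cases hq : splitC pRest with
          | nil => exact absurd hq (splitC_ne_nil pRest)
          | cons a l => simp [hq]
      | cons kc kRest =>
        have hlt : kRest.length ≤ n := by
          have h := List.length_dropWhile_le (p := fun c => decide (c ≠ ':')) (l := k)
          rw [hk] at h
          simp only [List.length_cons] at h
          omega
        cases hp : List.dropWhile (fun x => decide (x ≠ ':')) p with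
        | nil =>
          rw [splitC_eq k, splitC_eq p, hk, hp]
          rw [if_pos ?_]
          cases hq : splitC kRest with
          | nil => exact absurd hq (splitC_ne_nil kRest)
          | cons a l => simp [hq]
        | cons pc pRest =>
          have hred : (match kc :: kRest, pc :: pRest with
              | _ :: kRest, _ :: pRest => pmGoB kRest pRest
              | [], [] => true
              | _, _ => false) = pmGoB kRest pRest := rfl
          rw [hred, ih kRest pRest hlt]
          rw [splitC_eq k, splitC_eq p, hk, hp]
          simp only [List.length_cons, ne_eq, Nat.add_right_cancel_iff, List.zip_cons_cons]
          rw [pmLoopA_skip _ _ _ (cond_or hcond)]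

theorem pmGoB_eq (k p : List Char) :
    pmGoB k p =
      (if (splitC k).length ≠ (splitC p).length then false
       else pmLoopA ((splitC k).zip (splitC p))) :=
  pmGoB_eq_aux k.length k p le_rfl

-- ===== VERDICT (by name: the statement is the Claim_ definition above) =====
theorem pattern_matches_py_spec : Claim_equal_pattern_matches_py := by
  intro key pattern _
  unfold Spec_pattern_matches_py pattern_matches_py pattern_matches_py_alt
  rw [splitOn_eq_splitC, splitOn_eq_splitC, pmGoB_eq]
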